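-- pv_equiv track=rewrite | github.com/Kalyani2022/EIP_Projects | mail_sent_flask.py | bilk_mails
-- ===== SOURCE A (Python) =====
-- def bilk_mails(data):
--
--     recipients = []
--     for i in data:
--         recipients.append(i[0])
--
--     chunk = 50
--     test_emails = ['kalyanibhattacharjee@outlook.com', 'priyasisb@gmail.com']
--     send_recipients = []
--
--     for i in range(0, len(recipients), chunk-2):
--         chunk_recipients = recipients[i:i+(chunk-2)]
--         chunk_recipients.insert((chunk-2) , test_emails[0])
--         chunk_recipients.insert((chunk-1) , test_emails[1])
--         send_recipients.append(chunk_recipients)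
--
--     return send_recipients
-- ===== SOURCE B (Python) =====
-- def bilk_mails(data):
--     # One streaming pass: extract row[0] and chunk into groups of 48 on the fly,
--     # appending the two test addresses to each finished (or trailing partial) group.
--     test_emails = ['kalyanibhattacharjee@outlook.com', 'priyasisb@gmail.com']
--     send_recipients = []
--     current = []
--     for row in data:
--         current.append(row[0])
--         if len(current) == 48:
--             send_recipients.append(current + test_emails)
--             current = []
--     if current:
--         send_recipients.append(current + test_emails)
--     return send_recipients
-- ===== Notes on version B (the rewrite author's own statement) =====
-- stated objective: simpler
-- what changed: Replaces A's two-pass scheme (build the full recipients list, then slice it by a range loop with two clamped insert calls per chunk) with a single streaming loop that appends row[0] to a running 48-element buffer and flushes buffer+test_emails whenever the buffer fills, plus a final flush of the non-empty remainder.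
import Mathlib
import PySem

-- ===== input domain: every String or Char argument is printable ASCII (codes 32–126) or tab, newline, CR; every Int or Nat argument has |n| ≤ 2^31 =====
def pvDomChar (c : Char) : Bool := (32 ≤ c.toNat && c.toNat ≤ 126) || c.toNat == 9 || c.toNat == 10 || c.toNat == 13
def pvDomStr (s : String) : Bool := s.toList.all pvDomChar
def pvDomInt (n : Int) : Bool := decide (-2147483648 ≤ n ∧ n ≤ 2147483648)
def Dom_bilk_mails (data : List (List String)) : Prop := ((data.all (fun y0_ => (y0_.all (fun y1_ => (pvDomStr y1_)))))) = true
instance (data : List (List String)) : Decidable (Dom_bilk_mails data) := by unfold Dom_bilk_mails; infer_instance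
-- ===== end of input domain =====

-- B differs from A by fusing the extraction pass and the chunking pass into one streaming
-- loop over the rows with a 48-element buffer; equivalence is proved on inputs whose rows
-- are all non-empty (elsewhere Python's i[0] raises IndexError in both A and B).

-- ===== PORT A =====
-- i[0] is ported as (pyGet? i 0).getD "": exact on Pre_ (every row non-empty); on an
-- empty row Python raises IndexError, which Pre_ excludes.
def bilk_mails (data : List (List String)) : List (List String) :=
  let recipients := data.foldl (fun acc i => acc ++ [(PySem.List.pyGet? i 0).getD ""]) []
  let chunk : Int := 50
  let test_emails := ["kalyanibhattacharjee@outlook.com", "priyasisb@gmail.com"]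
  (PySem.List.pyRange 0 recipients.length (chunk - 2)).foldl
    (fun send_recipients i =>
      let chunk_recipients := PySem.List.slice recipients (some i) (some (i + (chunk - 2)))
      let chunk_recipients := PySem.List.insert chunk_recipients (chunk - 2)
        (PySem.List.pyGetD test_emails 0 "")
      let chunk_recipients := PySem.List.insert chunk_recipients (chunk - 1)
        (PySem.List.pyGetD test_emails 1 "")
      send_recipients ++ [chunk_recipients]) []

-- ===== PORT B =====
-- row[0] ported as (pyGet? row 0).getD "": exact on Pre_ (every row non-empty).
def bilkAltGo (tests : List String) : List (List String) → List String → List (List String)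
  | [], current => if current.isEmpty then [] else [current ++ tests]
  | row :: rest, current =>
      let current' := current ++ [(PySem.List.pyGet? row 0).getD ""]
      if current'.length = 48 then (current' ++ tests) :: bilkAltGo tests rest []
      else bilkAltGo tests rest current'

def bilk_mails_alt (data : List (List String)) : List (List String) :=
  bilkAltGo ["kalyanibhattacharjee@outlook.com", "priyasisb@gmail.com"] data []

-- ===== PRECONDITION & SPEC =====
-- Pre_ excludes inputs containing an empty row: there Python A (and B) raises IndexError on i[0].
def Pre_bilk_mails (data : List (List String)) : Prop := ∀ r ∈ data, r ≠ []
instance (data : List (List String)) : Decidable (Pre_bilk_mails data) := by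
  unfold Pre_bilk_mails; infer_instance
def pvWitness_bilk_mails : List (List String) := [["a@x.com"], ["b@x.com", "zz"]]
def Spec_bilk_mails (data : List (List String)) (out : List (List String)) : Prop := out = bilk_mails_alt data
instance (data : List (List String)) (out : List (List String)) : Decidable (Spec_bilk_mails data out) := by unfold Spec_bilk_mails; infer_instance

-- ===== CLAIM (what is proved, stated in full; the proofs are below) =====
def Claim_equal_bilk_mails : Prop := ∀ (data : List (List String)), Dom_bilk_mails data → Pre_bilk_mails data → Spec_bilk_mails data (bilk_mails data)

-- ===== LEMMAS AND PROOFS =====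

def bilkTests : List String := ["kalyanibhattacharjee@outlook.com", "priyasisb@gmail.com"]

-- common intermediate: chunk a flat list into groups of 48, each followed by the two tests
def bilkChunks (xs : List String) : List (List String) :=
  if h : xs = [] then [] else
    (xs.take 48 ++ bilkTests) :: bilkChunks (xs.drop 48)
termination_by xs.length
decreasing_by
  have : 0 < xs.length := List.length_pos_of_ne_nil h
  simp [List.length_drop]; omega

theorem bilkChunks_nil : bilkChunks [] = [] := by
  rw [bilkChunks]; simp

theorem bilkChunks_cons (xs : List String) (h : xs ≠ []) :
    bilkChunks xs = (xs.take 48 ++ bilkTests) :: bilkChunks (xs.drop 48) := by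
  rw [bilkChunks]; simp [h]

theorem pyRange48_nil (a b : Int) (h : b ≤ a) : PySem.List.pyRange a b 48 = [] := by
  rw [PySem.List.pyRange_of_pos a b (by norm_num)]
  simp [show ¬ a < b by omega]

theorem pyRange48_cons (a b : Int) (h : a < b) :
    PySem.List.pyRange a b 48 = a :: PySem.List.pyRange (a + 48) b 48 := by
  rw [PySem.List.pyRange_of_pos a b (by norm_num),
      PySem.List.pyRange_of_pos (a + 48) b (by norm_num)]
  have hc : ((b - a + 48 - 1) / 48).toNat
      = (if a + 48 < b then ((b - (a + 48) + 48 - 1) / 48).toNat else 0) + 1 := by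
    split_ifs with h2 <;> omega
  rw [if_pos h, hc, List.range_succ_eq_map]
  simp [List.map_map, Function.comp]
  intro k _
  ring

theorem insert_clamped (c : List String) (p : ℕ) (t : String) (h : c.length ≤ p) :
    PySem.List.insert c (p : Int) t = c ++ [t] := by
  have hm : min (p : Int) (c.length : Int) = (c.length : Int) := by omega
  have hp : ¬ ((p : Int) < 0) := by omega
  simp [PySem.List.insert, PySem.List.sliceIndices, hm, hp]

-- A's range loop, started at offset j, produces the chunks of the dropped suffix
theorem bilk_A_loop (full : List String) (j : ℕ) (acc : List (List String)) :
    (PySem.List.pyRange (j : Int) full.length 48).foldl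
      (fun send_recipients i =>
        let c := PySem.List.slice full (some i) (some (i + 48))
        let c := PySem.List.insert c 48 (PySem.List.pyGetD bilkTests 0 "")
        let c := PySem.List.insert c 49 (PySem.List.pyGetD bilkTests 1 "")
        send_recipients ++ [c]) acc
      = acc ++ bilkChunks (full.drop j) := by
  by_cases hj : full.length ≤ j
  · rw [pyRange48_nil _ _ (by exact_mod_cast hj)]
    simp [List.drop_eq_nil_of_le hj, bilkChunks_nil]
  · have hj' : j < full.length := by omega
    rw [pyRange48_cons _ _ (by exact_mod_cast hj')]
    simp only [List.foldl_cons]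
    have hslice : PySem.List.slice full (some (j : Int)) (some ((j : Int) + 48))
        = (full.drop j).take 48 := by
      have := PySem.List.slice_natCast_add full j 48
      simpa using this
    have hlen : ((full.drop j).take 48).length ≤ 48 := by
      rw [List.length_take]; omega
    have h48 : PySem.List.insert ((full.drop j).take 48) 48
        (PySem.List.pyGetD bilkTests 0 "") = (full.drop j).take 48 ++ [bilkTests[0]] := by
      have := insert_clamped ((full.drop j).take 48) 48 bilkTests[0] hlen
      simpa [bilkTests, PySem.List.pyGetD_ofNat'] using this
    have hlen2 : ((full.drop j).take 48 ++ [bilkTests[0]]).length ≤ 49 := by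
      rw [List.length_append, List.length_take]
      simp only [List.length_cons, List.length_nil]
      omega
    have h49 : PySem.List.insert ((full.drop j).take 48 ++ [bilkTests[0]]) 49
        (PySem.List.pyGetD bilkTests 1 "")
        = (full.drop j).take 48 ++ [bilkTests[0]] ++ [bilkTests[1]] := by
      have := insert_clamped ((full.drop j).take 48 ++ [bilkTests[0]]) 49 bilkTests[1] hlen2
      simpa [bilkTests, PySem.List.pyGetD_ofNat'] using this
    have hstep : ((j : Int) + 48) = ((j + 48 : ℕ) : Int) := by push_cast; ring
    rw [hslice, h48, h49, hstep, bilk_A_loop full (j + 48)]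
    rw [bilkChunks_cons (full.drop j) (by
      intro hnil
      have := List.drop_eq_nil_iff.mp hnil
      omega)]
    simp [bilkTests, List.append_assoc]
termination_by full.length - j
decreasing_by omega

def bilkExt (r : List String) : String := (PySem.List.pyGet? r 0).getD ""

-- B's streaming loop computes the chunks of buffer ++ extracted rows
theorem bilk_B_loop (data : List (List String)) (cur : List String) (hcur : cur.length < 48) :
    bilkAltGo bilkTests data cur = bilkChunks (cur ++ data.map bilkExt) := by
  induction data generalizing cur with
  | nil =>
    simp only [bilkAltGo, List.map_nil, List.append_nil]
    by_cases h : cur = []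
    · simp [h, bilkChunks_nil]
    · rw [bilkChunks_cons cur h]
      simp [List.isEmpty_iff, h, List.take_of_length_le (by omega : cur.length ≤ 48),
        List.drop_eq_nil_of_le (by omega : cur.length ≤ 48), bilkChunks_nil]
  | cons row rest ih =>
    simp only [bilkAltGo]
    by_cases hfull : (cur ++ [(PySem.List.pyGet? row 0).getD ""]).length = 48
    · rw [if_pos hfull, ih [] (by norm_num)]
      simp only [List.nil_append]
      rw [show cur ++ (row :: rest).map bilkExt
          = (cur ++ [(PySem.List.pyGet? row 0).getD ""]) ++ rest.map bilkExt by
        simp [bilkExt, List.append_assoc]]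
      rw [bilkChunks_cons ((cur ++ [(PySem.List.pyGet? row 0).getD ""]) ++ (rest.map bilkExt))
        (by simp)]
      rw [show (48 : ℕ) = (cur ++ [(PySem.List.pyGet? row 0).getD ""]).length from hfull.symm]
      rw [List.take_left, List.drop_left]
    · rw [if_neg hfull, ih _ (by simp at hfull ⊢; omega)]
      simp [bilkExt, List.append_assoc]

-- ===== VERDICT (by name: the statement is the Claim_ definition above) =====
theorem bilk_mails_spec : Claim_equal_bilk_mails := by
  intro data _ _
  unfold Spec_bilk_mails bilk_mails bilk_mails_alt
  simp only []
  rw [show (List.foldl (fun acc i => acc ++ [(PySem.List.pyGet? i 0).getD ""]) ([] : List String) data)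
      = data.map (fun i => (PySem.List.pyGet? i 0).getD "") from by
    simpa using PySem.List.foldl_append_singleton_eq_map
      (fun i : List String => (PySem.List.pyGet? i 0).getD "") data []]
  have hA := bilk_A_loop (data.map (fun i => (PySem.List.pyGet? i 0).getD "")) 0 []
  have hB := bilk_B_loop data [] (by norm_num)
  refine hA.trans (Eq.trans ?_ hB.symm)
  simp only [List.nil_append, List.drop_zero]
  rfl
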